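-- pv_equiv track=rewrite | github.com/ahsanwebdeveloper/AI-personality--agent | core/enforcement.py | is_in_scope
-- ===== SOURCE A (Python) =====
-- def is_in_scope(user_input, scope):
--     text = user_input.lower()
--
--     if scope == "math":
--         return any(char.isdigit() for char in text)
--
--     if scope == "medical":
--         keywords = [
--             "medical", "health", "doctor", "medicine",
--             "symptom", "disease", "fever", "pain"
--         ]
--         return any(word in text for word in keywords)
--
--     if scope == "travel":
--         keywords = [
--             "travel", "trip", "tour", "guide",
--             "destination", "flight", "hotel"
--         ]
--         return any(word in text for word in keywords)
--
--     if scope == "cooking":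
--         keywords = [
--             "cook", "recipe", "food", "bake",
--             "ingredients", "kitchen"
--         ]
--         return any(word in text for word in keywords)
--
--     if scope == "tech":
--         keywords = [
--             "error", "bug", "software", "computer",
--         "install", "crash", "issue", "laptop",
--         "pc", "windows", "linux", "mac",
--         "network", "internet", "wifi",
--         "driver", "update", "server"
--         ]
--         return any(word in text for word in keywords)
--
--     return False
-- ===== SOURCE B (Python) =====
-- SCOPE_KEYWORDS = {
--     "medical": [
--         "medical", "health", "doctor", "medicine",
--         "symptom", "disease", "fever", "pain"
--     ],
--     "travel": [
--         "travel", "trip", "tour", "guide",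
--         "destination", "flight", "hotel"
--     ],
--     "cooking": [
--         "cook", "recipe", "food", "bake",
--         "ingredients", "kitchen"
--     ],
--     "tech": [
--         "error", "bug", "software", "computer",
--         "install", "crash", "issue", "laptop",
--         "pc", "windows", "linux", "mac",
--         "network", "internet", "wifi",
--         "driver", "update", "server"
--     ],
-- }
--
--
-- def is_in_scope(user_input, scope):
--     text = user_input.lower()
--     if scope == "math":
--         return any(c.isdigit() for c in text)
--     keywords = SCOPE_KEYWORDS.get(scope)
--     if keywords is None:
--         return False
--     # single left-to-right scan over text positions: at each offset, test
--     # whether some keyword of this scope starts exactly there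
--     for i in range(len(text)):
--         for word in keywords:
--             if text.startswith(word, i):
--                 return True
--     return False
-- ===== Notes on version B (the rewrite author's own statement) =====
-- stated objective: alternative
-- what changed: Replaces the five-way if-chain of keyword-major 'word in text' substring tests with a scope->keywords table plus a single position-major scan of the text that checks, at each offset, whether some keyword of the looked-up scope starts there.
import Mathlib
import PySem

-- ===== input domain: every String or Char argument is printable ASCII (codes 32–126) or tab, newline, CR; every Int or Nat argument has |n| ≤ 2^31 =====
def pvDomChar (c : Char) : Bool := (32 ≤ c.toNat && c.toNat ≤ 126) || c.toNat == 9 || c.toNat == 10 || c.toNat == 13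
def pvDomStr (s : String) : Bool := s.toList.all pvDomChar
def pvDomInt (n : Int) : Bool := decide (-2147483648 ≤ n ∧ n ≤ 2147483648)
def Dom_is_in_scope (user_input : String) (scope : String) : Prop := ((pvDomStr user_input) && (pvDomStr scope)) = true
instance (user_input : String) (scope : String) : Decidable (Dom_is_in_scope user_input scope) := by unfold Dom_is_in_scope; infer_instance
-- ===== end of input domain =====

-- B replaces A's if-chain of keyword-major 'word in text' substring tests with a scope→keywords
-- table plus one position-major scan of the text (at each offset, does some keyword start there?).

-- ===== PORT A =====
def is_in_scope (user_input : String) (scope : String) : Bool :=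
  let text := PySem.Str.lower user_input
  if scope == "math" then
    text.toList.any (fun c => PySem.Chars.isdigit c)
  else if scope == "medical" then
    let keywords := ["medical", "health", "doctor", "medicine",
                     "symptom", "disease", "fever", "pain"]
    keywords.any (fun w => PySem.Str.isIn w text)
  else if scope == "travel" then
    let keywords := ["travel", "trip", "tour", "guide",
                     "destination", "flight", "hotel"]
    keywords.any (fun w => PySem.Str.isIn w text)
  else if scope == "cooking" then
    let keywords := ["cook", "recipe", "food", "bake",
                     "ingredients", "kitchen"]
    keywords.any (fun w => PySem.Str.isIn w text)
  else if scope == "tech" then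
    let keywords := ["error", "bug", "software", "computer",
                     "install", "crash", "issue", "laptop",
                     "pc", "windows", "linux", "mac",
                     "network", "internet", "wifi",
                     "driver", "update", "server"]
    keywords.any (fun w => PySem.Str.isIn w text)
  else
    false

-- ===== PORT B =====
def SCOPE_KEYWORDS : PySem.Dict String (List String) :=
  PySem.Dict.mk
    [("medical", ["medical", "health", "doctor", "medicine",
                  "symptom", "disease", "fever", "pain"]),
     ("travel", ["travel", "trip", "tour", "guide",
                 "destination", "flight", "hotel"]),
     ("cooking", ["cook", "recipe", "food", "bake",
                  "ingredients", "kitchen"]),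
     ("tech", ["error", "bug", "software", "computer",
               "install", "crash", "issue", "laptop",
               "pc", "windows", "linux", "mac",
               "network", "internet", "wifi",
               "driver", "update", "server"])]

def is_in_scope_alt (user_input : String) (scope : String) : Bool :=
  let text := PySem.Str.lower user_input
  if scope == "math" then
    text.toList.any (fun c => PySem.Chars.isdigit c)
  else
    match SCOPE_KEYWORDS.get? scope with
    | none => false
    | some keywords =>
      -- for i in range(len(text)): for word in keywords: if text.startswith(word, i): return True
      -- text.startswith(word, i) with 0 ≤ i is exactly: word is a prefix of text[i:]
      (List.range text.toList.length).any (fun i =>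
        keywords.any (fun w => PySem.Chars.startswith (text.toList.drop i) w.toList))

-- ===== PRECONDITION & SPEC =====
def Spec_is_in_scope (user_input : String) (scope : String) (out : Bool) : Prop := out = is_in_scope_alt user_input scope
instance (user_input : String) (scope : String) (out : Bool) : Decidable (Spec_is_in_scope user_input scope out) := by unfold Spec_is_in_scope; infer_instance

-- ===== CLAIM =====
def Claim_equal_is_in_scope : Prop := ∀ (user_input : String) (scope : String), Dom_is_in_scope user_input scope → Spec_is_in_scope user_input scope (is_in_scope user_input scope)

-- ===== LEMMAS AND PROOFS =====

-- a nonempty word is a substring of l iff it starts at some position i < l.length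
theorem isIn_eq_scan (w : List Char) (l : List Char) (hw : w ≠ []) :
    PySem.Chars.isIn w l = true ↔ ∃ i < l.length, w <+: l.drop i := by
  rw [← PySem.Chars.exists_prefix_drop_iff_isIn]
  constructor
  · rintro ⟨j, hj⟩
    by_cases h : j < l.length
    · exact ⟨j, h, hj⟩
    · exfalso
      rw [List.drop_eq_nil_of_le (le_of_not_gt h)] at hj
      exact hw (List.prefix_nil.mp hj)
  · rintro ⟨i, _, h⟩
    exact ⟨i, h⟩

-- keyword-major substring tests ≡ position-major scan, for nonempty keywords
theorem scan_eq (kws : List String) (l : List Char)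
    (hne : ∀ w ∈ kws, w.toList ≠ []) :
    kws.any (fun w => PySem.Chars.isIn w.toList l)
      = (List.range l.length).any (fun i =>
          kws.any (fun w => PySem.Chars.startswith (l.drop i) w.toList)) := by
  rw [Bool.eq_iff_iff]
  simp only [List.any_eq_true, List.mem_range, PySem.Chars.startswith_iff]
  constructor
  · rintro ⟨w, hw, hin⟩
    obtain ⟨i, hi, hp⟩ := (isIn_eq_scan w.toList l (hne w hw)).mp hin
    exact ⟨i, hi, w, hw, hp⟩
  · rintro ⟨i, hi, w, hw, hp⟩
    exact ⟨w, hw, (isIn_eq_scan w.toList l (hne w hw)).mpr ⟨i, hi, hp⟩⟩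

theorem branch_eq (kws : List String) (text : String)
    (hne : ∀ w ∈ kws, w.toList ≠ []) :
    kws.any (fun w => PySem.Str.isIn w text)
      = (List.range text.toList.length).any (fun i =>
          kws.any (fun w => PySem.Chars.startswith (text.toList.drop i) w.toList)) := by
  simp only [PySem.Str.isIn_eq]
  exact scan_eq kws text.toList hne

-- ===== VERDICT =====
set_option maxHeartbeats 2000000 in
theorem is_in_scope_spec : Claim_equal_is_in_scope := by
  intro user_input scope _
  unfold Spec_is_in_scope is_in_scope is_in_scope_alt SCOPE_KEYWORDS
  by_cases h1 : scope = "math"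
  · simp [h1]
  by_cases h2 : scope = "medical"
  · subst h2
    simp only [beq_iff_eq, reduceIte, PySem.Dict.get?_mk_cons]
    exact branch_eq _ _ (by decide)
  by_cases h3 : scope = "travel"
  · subst h3
    simp only [beq_iff_eq, reduceIte, PySem.Dict.get?_mk_cons]
    exact branch_eq _ _ (by decide)
  by_cases h4 : scope = "cooking"
  · subst h4
    simp only [beq_iff_eq, reduceIte, PySem.Dict.get?_mk_cons]
    exact branch_eq _ _ (by decide)
  by_cases h5 : scope = "tech"
  · subst h5
    simp only [beq_iff_eq, reduceIte, PySem.Dict.get?_mk_cons]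
    exact branch_eq _ _ (by decide)
  have m2 : (("medical" : String) == scope) = false := beq_eq_false_iff_ne.mpr (Ne.symm h2)
  have m3 : (("travel" : String) == scope) = false := beq_eq_false_iff_ne.mpr (Ne.symm h3)
  have m4 : (("cooking" : String) == scope) = false := beq_eq_false_iff_ne.mpr (Ne.symm h4)
  have m5 : (("tech" : String) == scope) = false := beq_eq_false_iff_ne.mpr (Ne.symm h5)
  simp [h1, h2, h3, h4, h5, m2, m3, m4, m5, PySem.Dict.get?]
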